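-- pv_equiv track=rewrite | github.com/lirongzzuin/coding-test-prep | 99Club_Coding_Test_Study/BOJ_3986/BOJ_3986.py | is_good_word
-- ===== SOURCE A (Python) =====
-- def is_good_word(word):
--     stack = []
--     for ch in word:
--         if stack and stack[-1] == ch:
--             stack.pop()
--         else:
--             stack.append(ch)
--     return not stack
-- ===== SOURCE B (Python) =====
-- def _pass(items):
--     out = []
--     i = 0
--     while i < len(items):
--         if i + 1 < len(items) and items[i] == items[i + 1]:
--             i += 2
--         else:
--             out.append(items[i])
--             i += 1
--     return out
--
--
-- def is_good_word(word):
--     items = list(word)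
--     while True:
--         nxt = _pass(items)
--         if len(nxt) == len(items):
--             return len(items) == 0
--         items = nxt
-- ===== Notes on version B (the rewrite author's own statement) =====
-- stated objective: alternative
-- what changed: Replaces the stack simulation by repeated whole-word scans that drop every adjacent equal pair, iterating to a fixed point (correct by confluence of adjacent-pair removal).
import Mathlib
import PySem

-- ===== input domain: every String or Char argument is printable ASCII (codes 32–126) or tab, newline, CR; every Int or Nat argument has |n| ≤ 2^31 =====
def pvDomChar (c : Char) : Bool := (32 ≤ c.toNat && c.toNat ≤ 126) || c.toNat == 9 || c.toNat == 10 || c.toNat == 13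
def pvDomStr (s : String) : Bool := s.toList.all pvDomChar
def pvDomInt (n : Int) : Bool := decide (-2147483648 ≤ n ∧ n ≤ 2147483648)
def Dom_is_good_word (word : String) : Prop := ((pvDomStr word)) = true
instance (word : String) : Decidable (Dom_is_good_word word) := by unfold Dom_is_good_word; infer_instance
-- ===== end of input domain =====

-- B replaces A's stack simulation by repeated full scans dropping adjacent equal pairs
-- until a fixed point (alternative decomposition, correct by confluence; not faster).


-- ===== PORT A =====
-- the stack is a List Char with head = top (Python's stack[-1])
def pvStep (st : List Char) (ch : Char) : List Char :=
  match st with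
  | c :: t => if c = ch then t else ch :: c :: t
  | [] => [ch]

def is_good_word (word : String) : Bool :=
  (word.toList.foldl pvStep []).isEmpty

-- ===== PORT B =====
-- one scan: drop every adjacent equal pair met left to right (Source B's _pass)
def pvPass : List Char → List Char
  | x :: y :: r => if x = y then pvPass r else x :: pvPass (y :: r)
  | l => l

-- Source B's while-True loop; fuel = word length totalizes it (each productive pass shrinks the list)
def pvLoop : Nat → List Char → List Char
  | 0, l => l
  | fuel + 1, l =>
    let p := pvPass l
    if p.length = l.length then l else pvLoop fuel p

def is_good_word_alt (word : String) : Bool :=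
  (pvLoop word.toList.length word.toList).isEmpty

-- ===== PRECONDITION & SPEC =====
def Spec_is_good_word (word : String) (out : Bool) : Prop := out = is_good_word_alt word
instance (word : String) (out : Bool) : Decidable (Spec_is_good_word word out) := by unfold Spec_is_good_word; infer_instance

-- ===== CLAIM (what is proved, stated in full; the proofs are below) =====
def Claim_equal_is_good_word : Prop := ∀ (word : String), Dom_is_good_word word → Spec_is_good_word word (is_good_word word)

-- ===== LEMMAS AND PROOFS =====

-- pvStep keeps the stack free of adjacent duplicates
theorem pvStep_chain {st : List Char} (h : List.IsChain (· ≠ ·) st) (ch : Char) :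
    List.IsChain (· ≠ ·) (pvStep st ch) := by
  match st with
  | [] => simp [pvStep]
  | c :: t =>
    simp only [pvStep]
    split
    next => exact h.tail
    next hne => exact List.isChain_cons_cons.mpr ⟨fun e => hne e.symm, h⟩

-- folding two equal chars over an adjacent-duplicate-free stack is a no-op
theorem pvStep_cancel {st : List Char} (h : List.IsChain (· ≠ ·) st) (x : Char) :
    pvStep (pvStep st x) x = st := by
  match st with
  | [] => simp [pvStep]
  | [c] => by_cases hc : c = x <;> simp [pvStep, hc]
  | c :: d :: t =>
    have hcd : c ≠ d := (List.isChain_cons_cons.mp h).1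
    by_cases hc : c = x
    · subst hc
      have hdx : ¬ d = c := fun e => hcd e.symm
      simp [pvStep, hdx]
    · simp [pvStep, hc]

-- one pass of pair removal does not change the stack fold
theorem foldl_pvPass (l : List Char) :
    ∀ st, List.IsChain (· ≠ ·) st →
      List.foldl pvStep st (pvPass l) = List.foldl pvStep st l := by
  induction l using pvPass.induct with
  | case1 y r ih =>
    intro st hst
    simp only [pvPass, if_true, List.foldl_cons]
    rw [ih st hst, pvStep_cancel hst]
  | case2 x y r hxy ih =>
    intro st hst
    simp only [pvPass, if_neg hxy, List.foldl_cons]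
    exact ih _ (pvStep_chain hst x)
  | case3 l h1 =>
    intro st _
    match l, h1 with
    | [], _ => rfl
    | [x], _ => rfl
    | x :: y :: r, h1 => exact (h1 x y r rfl).elim

theorem pvPass_length_le (l : List Char) : (pvPass l).length ≤ l.length := by
  induction l using pvPass.induct with
  | case1 y r ih => simp only [pvPass, if_true]; simp; omega
  | case2 x y r hxy ih => simp only [pvPass, if_neg hxy]; simpa using ih
  | case3 l h1 =>
    match l, h1 with
    | [], _ => exact Nat.le_refl _
    | [x], _ => exact Nat.le_refl _
    | x :: y :: r, h1 => exact (h1 x y r rfl).elim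

-- a fixed point of the pass has no adjacent equal pair
theorem pvPass_fixed_chain (l : List Char) (h : (pvPass l).length = l.length) :
    List.IsChain (· ≠ ·) l := by
  induction l using pvPass.induct with
  | case1 y r ih =>
    exfalso
    have hle := pvPass_length_le r
    simp only [pvPass, if_true] at h
    simp at h; omega
  | case2 x y r hxy ih =>
    simp only [pvPass, if_neg hxy] at h
    simp at h
    exact List.isChain_cons_cons.mpr ⟨hxy, ih h⟩
  | case3 l h1 =>
    match l, h1 with
    | [], _ => simp
    | [x], _ => simp
    | x :: y :: r, h1 => exact (h1 x y r rfl).elim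

-- the loop preserves the stack fold
theorem foldl_pvLoop (fuel : Nat) (l : List Char) :
    List.foldl pvStep [] (pvLoop fuel l) = List.foldl pvStep [] l := by
  induction fuel generalizing l with
  | zero => rfl
  | succ n ih =>
    simp only [pvLoop]
    split
    · rfl
    · rw [ih (pvPass l), foldl_pvPass l [] (by simp)]

-- with enough fuel the loop reaches a fixed point of pvPass
theorem pvLoop_fixed (fuel : Nat) (l : List Char) (h : l.length ≤ fuel) :
    (pvPass (pvLoop fuel l)).length = (pvLoop fuel l).length := by
  induction fuel generalizing l with
  | zero =>
    have hnil : l = [] := List.eq_nil_of_length_eq_zero (by omega)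
    subst hnil; rfl
  | succ n ih =>
    simp only [pvLoop]
    split
    · assumption
    · have hle := pvPass_length_le l
      exact ih (pvPass l) (by omega)

-- folding an irreducible word over a compatible stack just reverses it on top
theorem foldl_irreducible (l : List Char) :
    ∀ st, List.IsChain (· ≠ ·) l →
      (∀ c d, l.head? = some c → st.head? = some d → c ≠ d) →
      List.foldl pvStep st l = l.reverse ++ st := by
  induction l with
  | nil => intro st _ _; rfl
  | cons x r ih =>
    intro st hl hhd
    have hstep : pvStep st x = x :: st := by
      match st with
      | [] => rfl
      | d :: t =>
        have hxd : x ≠ d := hhd x d rfl rfl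
        have hdx : ¬ d = x := fun e => hxd e.symm
        simp [pvStep, hdx]
    simp only [List.foldl_cons, hstep]
    rw [ih (x :: st) hl.tail ?_]
    · simp
    · intro c d hc hd
      simp at hd
      subst hd
      match r, hc with
      | c :: r', hc =>
        simp at hc
        subst hc
        exact fun e => (List.isChain_cons_cons.mp hl).1 e.symm

-- ===== VERDICT (by name: the statement is the Claim_ definition above) =====
theorem is_good_word_spec : Claim_equal_is_good_word := by
  intro word _
  unfold Spec_is_good_word is_good_word is_good_word_alt
  set l := word.toList with hl
  set r := pvLoop l.length l with hr
  have hfold : List.foldl pvStep [] r = List.foldl pvStep [] l := foldl_pvLoop _ _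
  have hchain : List.IsChain (· ≠ ·) r :=
    pvPass_fixed_chain r (pvLoop_fixed l.length l (le_refl _))
  have hirr : List.foldl pvStep [] r = r.reverse ++ [] :=
    foldl_irreducible r [] hchain (by intro c d _ hd; simp at hd)
  rw [← hfold, hirr]
  simp
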